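-- pv_equiv track=rewrite | github.com/jmcdonough98/aoc | 2015/day15/15.py | findOptimalArrangmentTest
-- ===== SOURCE A (Python) =====
-- test = [(-1,-2,6,3,8),(2,3,-2,-1,3)]
--
-- def scoreCookie(ings, split, flag = 1):
--     score = 1
--     for i in range(len(ings[0]) - 1):
--         tmp = sum([split[x]*ings[x][i] for x in range(len(split))])
--         if tmp <= 0:
--             return 0
--         score *= tmp
--     if flag == 1:
--         calories = sum([split[x]*ings[x][-1] for x in range(len(split))])
--         if calories != 500:
--             return 0
--     return score
--
-- def findOptimalArrangmentTest(N):
--     maxScore = -1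
--     for x in range(1,N + 1):
--         y = N-x
--         score = scoreCookie(test,[x,y],0)
--         if score > maxScore:
--             maxScore = score
--
--     return maxScore
-- ===== SOURCE B (Python) =====
-- # O(log N) exact re-implementation: the score is a quartic in x, positive only on
-- # an interval; binary search on the discrete derivative finds its integer peak.
-- def findOptimalArrangmentTest(N):
--     if N < 1:
--         return -1
--
--     def f(x):
--         y = N - x
--         return (2*y - x) * (3*y - 2*x) * (6*x - 2*y) * (3*x - y)
--
--     lo = N // 4 + 1          # smallest x with all four factors positive
--     hi = (3 * N - 1) // 5    # largest such x
--     if lo > hi: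
--         return 0
--     while lo < hi:
--         mid = (lo + hi) // 2
--         if f(mid + 1) > f(mid):
--             lo = mid + 1
--         else:
--             hi = mid
--     return f(lo)
-- ===== Notes on version B (the rewrite author's own statement) =====
-- stated objective: faster
-- what changed: A scans every split x in 1..N and evaluates the cookie score for each; B restricts to the interval where the quartic score polynomial is positive, computed by two integer divisions, and finds the integer peak of this strictly log-concave polynomial by binary search on its discrete derivative, O(log N) instead of O(N).
import Mathlib
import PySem

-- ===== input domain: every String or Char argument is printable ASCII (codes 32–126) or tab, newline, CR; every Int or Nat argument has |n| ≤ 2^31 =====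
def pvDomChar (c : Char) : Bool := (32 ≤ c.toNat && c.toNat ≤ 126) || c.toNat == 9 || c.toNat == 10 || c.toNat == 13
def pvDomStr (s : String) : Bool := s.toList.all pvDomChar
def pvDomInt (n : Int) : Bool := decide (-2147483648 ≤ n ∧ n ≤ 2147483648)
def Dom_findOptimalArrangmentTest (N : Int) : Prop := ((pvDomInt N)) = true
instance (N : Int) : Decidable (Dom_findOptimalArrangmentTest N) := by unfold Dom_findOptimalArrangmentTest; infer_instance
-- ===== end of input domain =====

-- B replaces A's O(N) scan of all splits by an O(log N) binary search on the
-- discrete derivative of the (strictly log-concave) quartic score polynomial.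

-- ===== PORT A =====
-- module constant `test`
def pvTestConst : List (List Int) := [[-1, -2, 6, 3, 8], [2, 3, -2, -1, 3]]

-- sum([split[x]*ings[x][i] for x in range(len(split))])
-- (indexing uses pyGetD: every index taken here is in range, so it is exact)
def pvSumTerm (ings : List (List Int)) (split : List Int) (i : Int) : Int :=
  ((PySem.List.pyRange 0 (split.length : Int)).map
    (fun x => (PySem.List.pyGetD split x 0) * (PySem.List.pyGetD (PySem.List.pyGetD ings x []) i 0))).sum

-- the `for i in range(...)` loop of scoreCookie; `none` = the early `return 0`
def pvScoreLoop (ings : List (List Int)) (split : List Int) : List Int → Int → Option Int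
  | [], score => some score
  | i :: rest, score =>
    let tmp := pvSumTerm ings split i
    if tmp ≤ 0 then none
    else pvScoreLoop ings split rest (score * tmp)

def scoreCookie (ings : List (List Int)) (split : List Int) (flag : Int) : Int :=
  match pvScoreLoop ings split (PySem.List.pyRange 0 (((PySem.List.pyGetD ings 0 []).length : Int) - 1)) 1 with
  | none => 0
  | some score =>
    if flag = 1 then
      if pvSumTerm ings split (-1) ≠ 500 then 0 else score
    else score

def findOptimalArrangmentTest (N : Int) : Int :=
  (PySem.List.pyRange 1 (N + 1)).foldl
    (fun maxScore x =>
      let y := N - x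
      let score := scoreCookie pvTestConst [x, y] 0
      if score > maxScore then score else maxScore) (-1)

-- ===== PORT B =====
def pvF (N x : Int) : Int :=
  let y := N - x
  (2 * y - x) * (3 * y - 2 * x) * (6 * x - 2 * y) * (3 * x - y)

def pvBSGo (N : Int) : Nat → Int → Int → Int
  | 0, lo, _ => lo
  | fuel + 1, lo, hi =>
    if lo < hi then
      let mid := PySem.Int.floordiv (lo + hi) 2
      if pvF N (mid + 1) > pvF N mid then pvBSGo N fuel (mid + 1) hi
      else pvBSGo N fuel lo mid
    else lo

-- the while-loop of B, fuelled by the interval width (it shrinks every step)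
def pvBSearch (N lo hi : Int) : Int := pvBSGo N (hi - lo).toNat lo hi

def findOptimalArrangmentTest_alt (N : Int) : Int :=
  if N < 1 then -1
  else
    let lo := PySem.Int.floordiv N 4 + 1
    let hi := PySem.Int.floordiv (3 * N - 1) 5
    if lo > hi then 0
    else pvF N (pvBSearch N lo hi)

-- ===== PRECONDITION & SPEC =====
def Spec_findOptimalArrangmentTest (N : Int) (out : Int) : Prop := out = findOptimalArrangmentTest_alt N
instance (N : Int) (out : Int) : Decidable (Spec_findOptimalArrangmentTest N out) := by unfold Spec_findOptimalArrangmentTest; infer_instance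

-- ===== CLAIM (what is proved, stated in full; the proofs are below) =====
def Claim_equal_findOptimalArrangmentTest : Prop := ∀ (N : Int), Dom_findOptimalArrangmentTest N → Spec_findOptimalArrangmentTest N (findOptimalArrangmentTest N)

-- ===== LEMMAS AND PROOFS =====

-- feasible region [pvLo N, pvHi N]: exactly the x with all four score factors positive
def pvLo (N : Int) : Int := PySem.Int.floordiv N 4 + 1
def pvHi (N : Int) : Int := PySem.Int.floordiv (3 * N - 1) 5

-- the per-x value A's loop accumulates: the cookie score of split [x, N-x]
def pvS (N x : Int) : Int :=
  if 0 < 2 * N - 3 * x ∧ 0 < 3 * N - 5 * x ∧ 0 < 8 * x - 2 * N ∧ 0 < 4 * x - N then pvF N x else 0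

lemma pvDiv4 (N : Int) : 4 * PySem.Int.floordiv N 4 ≤ N ∧ N < 4 * PySem.Int.floordiv N 4 + 4 := by
  have h := PySem.Int.floordiv_mul_add_mod N 4
  have h1 := PySem.Int.mod_nonneg N (by norm_num : (0:Int) < 4)
  have h2 := PySem.Int.mod_lt N (by norm_num : (0:Int) < 4)
  omega

lemma pvDiv5 (N : Int) :
    5 * PySem.Int.floordiv (3 * N - 1) 5 ≤ 3 * N - 1 ∧ 3 * N - 1 < 5 * PySem.Int.floordiv (3 * N - 1) 5 + 5 := by
  have h := PySem.Int.floordiv_mul_add_mod (3 * N - 1) 5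
  have h1 := PySem.Int.mod_nonneg (3 * N - 1) (by norm_num : (0:Int) < 5)
  have h2 := PySem.Int.mod_lt (3 * N - 1) (by norm_num : (0:Int) < 5)
  omega

lemma pvRegion (N x : Int) (_hN : 1 ≤ N) (h1 : pvLo N ≤ x) (h2 : x ≤ pvHi N) :
    0 < 2 * N - 3 * x ∧ 0 < 3 * N - 5 * x ∧ 0 < 8 * x - 2 * N ∧ 0 < 4 * x - N := by
  have d4 := pvDiv4 N
  have d5 := pvDiv5 N
  unfold pvLo at h1
  unfold pvHi at h2
  omega

lemma pvBounds (N : Int) (_hN : 1 ≤ N) : 1 ≤ pvLo N ∧ pvHi N ≤ N := by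
  have d4 := pvDiv4 N
  have d5 := pvDiv5 N
  unfold pvLo pvHi
  omega

lemma pvF_factored (N x : Int) :
    pvF N x = (2 * N - 3 * x) * ((3 * N - 5 * x) * ((8 * x - 2 * N) * (4 * x - N))) := by
  unfold pvF; ring

lemma pvF_pos (N x : Int) (hN : 1 ≤ N) (h1 : pvLo N ≤ x) (h2 : x ≤ pvHi N) : 0 < pvF N x := by
  obtain ⟨a, b, c, d⟩ := pvRegion N x hN h1 h2
  rw [pvF_factored]
  exact mul_pos a (mul_pos b (mul_pos c d))

lemma pvS_in (N x : Int) (hN : 1 ≤ N) (h1 : pvLo N ≤ x) (h2 : x ≤ pvHi N) : pvS N x = pvF N x := by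
  unfold pvS
  exact if_pos (pvRegion N x hN h1 h2)

lemma pvS_out (N x : Int) (h : x < pvLo N ∨ pvHi N < x) : pvS N x = 0 := by
  unfold pvS
  rw [if_neg]
  rintro ⟨c1, c2, c3, c4⟩
  have d4 := pvDiv4 N
  have d5 := pvDiv5 N
  unfold pvLo pvHi at h
  omega

-- scoreCookie on the module's `test` with split [x, N-x] and flag 0 IS pvS
lemma pvSumTerm_eq (x y i : Int) :
    pvSumTerm pvTestConst [x, y] i =
      x * PySem.List.pyGetD [(-1 : Int), -2, 6, 3, 8] i 0 +
        (y * PySem.List.pyGetD [(2 : Int), 3, -2, -1, 3] i 0 + 0) := by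
  unfold pvSumTerm
  have hl : ((([x, y] : List Int).length : Int)) = 2 := by simp
  rw [hl]
  rw [(by decide : PySem.List.pyRange 0 2 = [0, 1])]
  simp only [List.map_cons, List.map_nil, List.sum_cons, List.sum_nil]
  rw [(by decide : PySem.List.pyGetD pvTestConst 0 [] = [(-1 : Int), -2, 6, 3, 8])]
  rw [(by decide : PySem.List.pyGetD pvTestConst 1 [] = [(2 : Int), 3, -2, -1, 3])]
  simp [pysem]

lemma pvScore_eq (N x : Int) : scoreCookie pvTestConst [x, N - x] 0 = pvS N x := by
  unfold scoreCookie
  have hr : PySem.List.pyRange 0 (((PySem.List.pyGetD pvTestConst 0 []).length : Int) - 1) = [0, 1, 2, 3] := by decide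
  rw [hr]
  have h0 : pvSumTerm pvTestConst [x, N - x] 0 = 2 * N - 3 * x := by
    rw [pvSumTerm_eq]
    rw [(by decide : PySem.List.pyGetD [(-1 : Int), -2, 6, 3, 8] 0 0 = -1)]
    rw [(by decide : PySem.List.pyGetD [(2 : Int), 3, -2, -1, 3] 0 0 = 2)]
    ring
  have h1 : pvSumTerm pvTestConst [x, N - x] 1 = 3 * N - 5 * x := by
    rw [pvSumTerm_eq]
    rw [(by decide : PySem.List.pyGetD [(-1 : Int), -2, 6, 3, 8] 1 0 = -2)]
    rw [(by decide : PySem.List.pyGetD [(2 : Int), 3, -2, -1, 3] 1 0 = 3)]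
    ring
  have h2 : pvSumTerm pvTestConst [x, N - x] 2 = 8 * x - 2 * N := by
    rw [pvSumTerm_eq]
    rw [(by decide : PySem.List.pyGetD [(-1 : Int), -2, 6, 3, 8] 2 0 = 6)]
    rw [(by decide : PySem.List.pyGetD [(2 : Int), 3, -2, -1, 3] 2 0 = -2)]
    ring
  have h3 : pvSumTerm pvTestConst [x, N - x] 3 = 4 * x - N := by
    rw [pvSumTerm_eq]
    rw [(by decide : PySem.List.pyGetD [(-1 : Int), -2, 6, 3, 8] 3 0 = 3)]
    rw [(by decide : PySem.List.pyGetD [(2 : Int), 3, -2, -1, 3] 3 0 = -1)]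
    ring
  simp only [pvScoreLoop, h0, h1, h2, h3]
  unfold pvS
  rw [pvF_factored]
  split_ifs <;> first | rfl | omega | ring

-- A's loop is a running max of pvS over range(1, N+1)
lemma pvA_fold (N : Int) :
    findOptimalArrangmentTest N =
      (PySem.List.pyRange 1 (N + 1)).foldl (fun m x => max m (pvS N x)) (-1) := by
  unfold findOptimalArrangmentTest
  apply PySem.List.foldl_congr_mem
  intro acc x _
  simp only [pvScore_eq]
  omega

-- a running max of a projection is the initial value or a value of the list
lemma pvFoldMem (f : Int → Int) :
    ∀ (l : List Int) (a : Int),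
      l.foldl (fun m x => max m (f x)) a = a ∨
        ∃ x ∈ l, l.foldl (fun m x => max m (f x)) a = f x := by
  intro l
  induction l with
  | nil => intro a; exact Or.inl rfl
  | cons y t ih =>
    intro a
    rcases ih (max a (f y)) with h | ⟨x, hx, he⟩
    · rcases max_choice a (f y) with hm | hm
      · left; simp only [List.foldl]; rw [h, hm]
      · right; exact ⟨y, List.mem_cons_self, by simp only [List.foldl]; rw [h, hm]⟩
    · right; exact ⟨x, List.mem_cons_of_mem _ hx, by simp only [List.foldl]; exact he⟩

-- Π(bᵢ+cᵢ) > Πbᵢ for nonnegative bᵢ and positive cᵢ (four factors)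
lemma pvStep2 (b b' c c' : Int) (hb : 0 ≤ b) (hb' : 0 ≤ b') (hc : 0 ≤ c) (hc' : 0 ≤ c') :
    b * b' + c * c' ≤ (b + c) * (b' + c') := by
  nlinarith [mul_nonneg hb hc', mul_nonneg hc hb']

lemma pvProd4 (b1 b2 b3 b4 c1 c2 c3 c4 : Int)
    (h1 : 0 ≤ b1) (h2 : 0 ≤ b2) (h3 : 0 ≤ b3) (h4 : 0 ≤ b4)
    (g1 : 0 < c1) (g2 : 0 < c2) (g3 : 0 < c3) (g4 : 0 < c4) :
    b1 * b2 * b3 * b4 < (b1 + c1) * (b2 + c2) * (b3 + c3) * (b4 + c4) := by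
  have h12 := pvStep2 b1 b2 c1 c2 h1 h2 g1.le g2.le
  have h34 := pvStep2 b3 b4 c3 c4 h3 h4 g3.le g4.le
  have hm : (b1 * b2 + c1 * c2) * (b3 * b4 + c3 * c4) ≤
      ((b1 + c1) * (b2 + c2)) * ((b3 + c3) * (b4 + c4)) :=
    mul_le_mul h12 h34 (by positivity) (by positivity)
  have hlast := pvStep2 (b1 * b2) (b3 * b4) (c1 * c2) (c3 * c4)
    (by positivity) (by positivity) (by positivity) (by positivity)
  have hc : 0 < c1 * c2 * (c3 * c4) := by positivity
  nlinarith [hm, hlast, hc]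

-- strict log-concavity: a weak rise at x forces a strict rise at x-1
lemma pvSC (N x : Int) (hN : 1 ≤ N) (hl : pvLo N ≤ x - 1) (hr : x + 1 ≤ pvHi N)
    (hup : pvF N x ≤ pvF N (x + 1)) : pvF N (x - 1) < pvF N x := by
  obtain ⟨p1, p2, p3, p4⟩ := pvRegion N (x - 1) hN hl (by omega)
  obtain ⟨q1, q2, q3, q4⟩ := pvRegion N (x + 1) hN (by omega) hr
  have hb1 : (0 : Int) ≤ (2 * N - 3 * x) ^ 2 - 9 := by nlinarith [mul_pos q1 p1]
  have hb2 : (0 : Int) ≤ (3 * N - 5 * x) ^ 2 - 25 := by nlinarith [mul_pos q2 p2]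
  have hb3 : (0 : Int) ≤ (8 * x - 2 * N) ^ 2 - 64 := by nlinarith [mul_pos p3 q3]
  have hb4 : (0 : Int) ≤ (4 * x - N) ^ 2 - 16 := by nlinarith [mul_pos p4 q4]
  have hp := pvProd4 ((2 * N - 3 * x) ^ 2 - 9) ((3 * N - 5 * x) ^ 2 - 25)
    ((8 * x - 2 * N) ^ 2 - 64) ((4 * x - N) ^ 2 - 16) 9 25 64 16
    hb1 hb2 hb3 hb4 (by norm_num) (by norm_num) (by norm_num) (by norm_num)
  have key : pvF N (x - 1) * pvF N (x + 1) < pvF N x * pvF N x := by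
    calc pvF N (x - 1) * pvF N (x + 1)
        = ((2 * N - 3 * x) ^ 2 - 9) * ((3 * N - 5 * x) ^ 2 - 25) *
            ((8 * x - 2 * N) ^ 2 - 64) * ((4 * x - N) ^ 2 - 16) := by unfold pvF; ring
      _ < ((2 * N - 3 * x) ^ 2 - 9 + 9) * ((3 * N - 5 * x) ^ 2 - 25 + 25) *
            ((8 * x - 2 * N) ^ 2 - 64 + 64) * ((4 * x - N) ^ 2 - 16 + 16) := hp
      _ = pvF N x * pvF N x := by unfold pvF; ring
  have hf0 : 0 < pvF N x := pvF_pos N x hN (by omega) (by omega)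
  have hfm : 0 < pvF N (x - 1) := pvF_pos N (x - 1) hN hl (by omega)
  have hmono : pvF N (x - 1) * pvF N x ≤ pvF N (x - 1) * pvF N (x + 1) :=
    mul_le_mul_of_nonneg_left hup hfm.le
  exact lt_of_mul_lt_mul_right (lt_of_le_of_lt hmono key) hf0.le

-- a weak rise at j propagates down to a strict rise at every k < j
lemma pvRiseDown (N : Int) (hN : 1 ≤ N) :
    ∀ (n : Nat) (j k : Int), (j - k).toNat = n → pvLo N ≤ k → k < j → j + 1 ≤ pvHi N →
      pvF N j ≤ pvF N (j + 1) → pvF N k < pvF N (k + 1) := by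
  intro n
  induction n with
  | zero => intro j k h0 _ hkj _ _; exfalso; omega
  | succ n ih =>
    intro j k h0 hk hkj hj hup
    by_cases hcase : k = j - 1
    · subst hcase
      have hs := pvSC N j hN (by omega) hj hup
      rwa [show j - 1 + 1 = j by ring]
    · have hstep : pvF N (j - 1) < pvF N j := pvSC N j hN (by omega) hj hup
      exact ih (j - 1) k (by omega) hk (by omega) (by omega)
        (by rw [show j - 1 + 1 = j by ring]; exact hstep.le)

lemma pvChainInc (N : Int) (hN : 1 ≤ N) :
    ∀ (n : Nat) (k m : Int), (m - k).toNat = n → pvLo N ≤ k → k ≤ m → m + 1 ≤ pvHi N →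
      pvF N m ≤ pvF N (m + 1) → pvF N k ≤ pvF N (m + 1) := by
  intro n
  induction n with
  | zero =>
    intro k m h0 _ hkm _ hup
    have : k = m := by omega
    subst this; exact hup
  | succ n ih =>
    intro k m h0 hk hkm hm hup
    have h1 : pvF N k < pvF N (k + 1) :=
      pvRiseDown N hN ((m - k).toNat) m k rfl hk (by omega) hm hup
    have h2 := ih (k + 1) m (by omega) (by omega) (by omega) hm hup
    linarith

lemma pvChainDec (N : Int) (hN : 1 ≤ N) :
    ∀ (n : Nat) (m k : Int), (k - m).toNat = n → pvLo N ≤ m → m ≤ k → k ≤ pvHi N →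
      pvF N (m + 1) ≤ pvF N m → pvF N k ≤ pvF N m := by
  intro n
  induction n with
  | zero =>
    intro m k h0 _ hmk _ _
    have : k = m := by omega
    subst this; exact le_refl _
  | succ n ih =>
    intro m k h0 hm hmk hk hdn
    by_cases hkm : k = m + 1
    · subst hkm; exact hdn
    · have hstep : pvF N (m + 2) < pvF N (m + 1) := by
        by_contra hcon
        push_neg at hcon
        have hs := pvSC N (m + 1) hN (by omega) (by omega)
          (by rw [show m + 1 + 1 = m + 2 by ring]; exact hcon)
        rw [show m + 1 - 1 = m by ring] at hs
        linarith
      have := ih (m + 1) k (by omega) (by omega) (by omega) hk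
        (by rw [show m + 1 + 1 = m + 2 by ring]; exact hstep.le)
      linarith

-- binary-search correctness on the unimodal region
lemma pvBSGo_spec (N : Int) (hN : 1 ≤ N) :
    ∀ (fuel : Nat) (lo hi : Int), (hi - lo).toNat ≤ fuel → pvLo N ≤ lo → lo ≤ hi → hi ≤ pvHi N →
      lo ≤ pvBSGo N fuel lo hi ∧ pvBSGo N fuel lo hi ≤ hi ∧
        ∀ k, lo ≤ k → k ≤ hi → pvF N k ≤ pvF N (pvBSGo N fuel lo hi) := by
  intro fuel
  induction fuel with
  | zero =>
    intro lo hi h0 hlo hlh hhi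
    simp only [pvBSGo]
    refine ⟨le_refl _, hlh, ?_⟩
    intro k hk1 hk2
    have : k = lo := by omega
    subst this; exact le_refl _
  | succ fuel ih =>
    intro lo hi h0 hlo hlh hhi
    simp only [pvBSGo]
    by_cases h : lo < hi
    · have hm1 : lo ≤ PySem.Int.floordiv (lo + hi) 2 :=
        (PySem.Int.le_floordiv_iff_mul_le (by norm_num)).mpr (by omega)
      have hm2 : PySem.Int.floordiv (lo + hi) 2 < hi :=
        (PySem.Int.floordiv_lt_iff_lt_mul (by norm_num)).mpr (by omega)
      set mid := PySem.Int.floordiv (lo + hi) 2 with hmiddef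
      rw [if_pos h]
      by_cases hrise : pvF N (mid + 1) > pvF N mid
      · rw [if_pos hrise]
        obtain ⟨b1, b2, b3⟩ := ih (mid + 1) hi (by omega) (by omega) (by omega) hhi
        refine ⟨by omega, b2, ?_⟩
        intro k hk1 hk2
        by_cases hks : mid + 1 ≤ k
        · exact b3 k hks hk2
        · have hinc := pvChainInc N hN ((mid - k).toNat) k mid rfl (by omega) (by omega)
            (by omega) (le_of_lt hrise)
          exact le_trans hinc (b3 (mid + 1) (le_refl _) (by omega))
      · rw [if_neg hrise]
        push_neg at hrise
        obtain ⟨b1, b2, b3⟩ := ih lo mid (by omega) hlo (by omega) (by omega)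
        refine ⟨b1, by omega, ?_⟩
        intro k hk1 hk2
        by_cases hks : k ≤ mid
        · exact b3 k hk1 hks
        · have hdec := pvChainDec N hN ((k - mid).toNat) mid k rfl (by omega) (by omega)
            (by omega) hrise
          exact le_trans hdec (b3 mid hm1 (le_refl _))
    · rw [if_neg h]
      refine ⟨le_refl _, hlh, ?_⟩
      intro k hk1 hk2
      have : k = lo := by omega
      subst this; exact le_refl _

lemma pvBS (N : Int) (hN : 1 ≤ N) (hE : pvLo N ≤ pvHi N) :
    pvLo N ≤ pvBSearch N (pvLo N) (pvHi N) ∧ pvBSearch N (pvLo N) (pvHi N) ≤ pvHi N ∧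
      ∀ k, pvLo N ≤ k → k ≤ pvHi N → pvF N k ≤ pvF N (pvBSearch N (pvLo N) (pvHi N)) := by
  unfold pvBSearch
  exact pvBSGo_spec N hN ((pvHi N - pvLo N).toNat) (pvLo N) (pvHi N) (le_refl _) (le_refl _) hE (le_refl _)

lemma pvMain (N : Int) : findOptimalArrangmentTest N = findOptimalArrangmentTest_alt N := by
  by_cases hN : N < 1
  · have hnil : PySem.List.pyRange 1 (N + 1) = [] := by
      rw [List.eq_nil_iff_forall_not_mem]
      intro x hx
      rw [PySem.List.mem_pyRange_one] at hx
      omega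
    unfold findOptimalArrangmentTest findOptimalArrangmentTest_alt
    rw [hnil, if_pos hN]
    rfl
  · push_neg at hN
    rw [pvA_fold]
    unfold findOptimalArrangmentTest_alt
    rw [if_neg (by omega)]
    show _ = if pvLo N > pvHi N then 0 else pvF N (pvBSearch N (pvLo N) (pvHi N))
    obtain ⟨hinit, hall⟩ := PySem.List.le_foldl_max_int (PySem.List.pyRange 1 (N + 1)) (pvS N) (-1)
    by_cases hE : pvHi N < pvLo N
    · rw [if_pos hE]
      have hz : ∀ x : Int, pvS N x = 0 := by
        intro x
        apply pvS_out
        rcases lt_or_ge x (pvLo N) with h | h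
        · exact Or.inl h
        · exact Or.inr (by omega)
      have h1mem : (1 : Int) ∈ PySem.List.pyRange 1 (N + 1) :=
        PySem.List.mem_pyRange_one.mpr ⟨le_refl _, by omega⟩
      have hge := hall 1 h1mem
      rw [hz 1] at hge
      rcases pvFoldMem (pvS N) (PySem.List.pyRange 1 (N + 1)) (-1) with h | ⟨x, _, h⟩
      · omega
      · rw [h, hz x]
    · push_neg at hE
      rw [if_neg (by omega)]
      obtain ⟨hb1, hb2, hb3⟩ := pvBS N hN hE
      obtain ⟨hBnd1, hBnd2⟩ := pvBounds N hN
      have hrpos : 0 < pvF N (pvBSearch N (pvLo N) (pvHi N)) :=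
        pvF_pos N _ hN hb1 hb2
      have hrmem : pvBSearch N (pvLo N) (pvHi N) ∈ PySem.List.pyRange 1 (N + 1) :=
        PySem.List.mem_pyRange_one.mpr ⟨by omega, by omega⟩
      have hge := hall _ hrmem
      rw [pvS_in N _ hN hb1 hb2] at hge
      have hle : (PySem.List.pyRange 1 (N + 1)).foldl (fun m x => max m (pvS N x)) (-1) ≤
          pvF N (pvBSearch N (pvLo N) (pvHi N)) := by
        rcases pvFoldMem (pvS N) (PySem.List.pyRange 1 (N + 1)) (-1) with h | ⟨x, _, h⟩
        · rw [h]; linarith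
        · rw [h]
          by_cases hin : pvLo N ≤ x ∧ x ≤ pvHi N
          · rw [pvS_in N x hN hin.1 hin.2]
            exact hb3 x hin.1 hin.2
          · rw [pvS_out N x (by omega)]
            linarith
      omega

-- ===== VERDICT (by name: the statement is the Claim_ definition above) =====
theorem findOptimalArrangmentTest_spec : Claim_equal_findOptimalArrangmentTest := by
  intro N _
  unfold Spec_findOptimalArrangmentTest
  exact pvMain N
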